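-- pv_equiv track=rewrite | github.com/aricursion/midi2desmos | util.py | midi_pitch_to_y
-- ===== SOURCE A (Python) =====
-- def midi_pitch_to_y(pitch):
--     lowE = 64
--     highe = 76
--
--     while pitch < lowE or pitch > highe:
--         if pitch < lowE:
--             pitch+=12
--
--         elif pitch > highe:
--             pitch  -=12
--
--     pos = pitch-lowE
--
--     return pos
-- ===== SOURCE B (Python) =====
-- def midi_pitch_to_y(pitch):
--     if pitch < 64:
--         return (pitch - 64) % 12
--     elif pitch > 76:
--         return (pitch - 77) % 12 + 1
--     else:
--         return pitch - 64
-- ===== Notes on version B (the rewrite author's own statement) =====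
-- stated objective: faster
-- what changed: Replaced the while-loop that repeatedly adds/subtracts 12 until the pitch lands in [64,76] with a three-branch closed-form modular expression (O(1) arithmetic, no loop).
import Mathlib
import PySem

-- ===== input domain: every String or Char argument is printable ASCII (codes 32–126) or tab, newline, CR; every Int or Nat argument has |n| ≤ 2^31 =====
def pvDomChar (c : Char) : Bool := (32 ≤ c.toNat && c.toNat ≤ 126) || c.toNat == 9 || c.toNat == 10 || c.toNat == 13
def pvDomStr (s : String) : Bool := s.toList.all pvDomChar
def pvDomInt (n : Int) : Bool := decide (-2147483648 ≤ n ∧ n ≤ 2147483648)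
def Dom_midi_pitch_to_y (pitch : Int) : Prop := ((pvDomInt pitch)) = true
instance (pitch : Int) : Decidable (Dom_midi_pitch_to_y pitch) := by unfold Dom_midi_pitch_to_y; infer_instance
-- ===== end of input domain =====

-- B replaces A's repeated ±12 loop with a closed-form three-branch modular expression (faster: O(1) vs O(|pitch|)).


-- ===== PORT A =====
-- the while loop of A, as structural recursion on the distance to the window [64, 76]
def midi_pitch_to_y_loop (pitch : Int) : Int :=
  if pitch < 64 then midi_pitch_to_y_loop (pitch + 12)
  else if pitch > 76 then midi_pitch_to_y_loop (pitch - 12)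
  else pitch
termination_by ((64 - pitch).toNat + (pitch - 76).toNat)
decreasing_by all_goals omega

def midi_pitch_to_y (pitch : Int) : Int :=
  midi_pitch_to_y_loop pitch - 64

-- ===== PORT B =====
def midi_pitch_to_y_alt (pitch : Int) : Int :=
  if pitch < 64 then PySem.Int.mod (pitch - 64) 12
  else if pitch > 76 then PySem.Int.mod (pitch - 77) 12 + 1
  else pitch - 64

-- ===== PRECONDITION & SPEC =====
def Spec_midi_pitch_to_y (pitch : Int) (out : Int) : Prop := out = midi_pitch_to_y_alt pitch
instance (pitch : Int) (out : Int) : Decidable (Spec_midi_pitch_to_y pitch out) := by unfold Spec_midi_pitch_to_y; infer_instance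

-- ===== CLAIM (what is proved, stated in full; the proofs are below) =====
def Claim_equal_midi_pitch_to_y : Prop := ∀ (pitch : Int), Dom_midi_pitch_to_y pitch → Spec_midi_pitch_to_y pitch (midi_pitch_to_y pitch)

-- ===== LEMMAS AND PROOFS =====

theorem loop_eq_alt (pitch : Int) :
    midi_pitch_to_y_loop pitch - 64 = midi_pitch_to_y_alt pitch := by
  induction pitch using midi_pitch_to_y_loop.induct with
  | case1 p h ih =>
      rw [midi_pitch_to_y_loop, if_pos h, ih]
      simp only [midi_pitch_to_y_alt, PySem.Int.mod_eq_emod_of_pos (by norm_num : (0:Int) < 12)]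
      split_ifs <;> omega
  | case2 p h1 h2 ih =>
      rw [midi_pitch_to_y_loop, if_neg h1, if_pos h2, ih]
      simp only [midi_pitch_to_y_alt, PySem.Int.mod_eq_emod_of_pos (by norm_num : (0:Int) < 12)]
      split_ifs <;> omega
  | case3 p h1 h2 =>
      rw [midi_pitch_to_y_loop, if_neg h1, if_neg h2]
      simp only [midi_pitch_to_y_alt, if_neg h1, if_neg h2]

-- ===== VERDICT (by name: the statement is the Claim_ definition above) =====
theorem midi_pitch_to_y_spec : Claim_equal_midi_pitch_to_y := by
  intro pitch _
  unfold Spec_midi_pitch_to_y midi_pitch_to_y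
  exact loop_eq_alt pitch
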